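-- pv_equiv track=rewrite | github.com/gab-python/labpyproject | apps/labpyrinthe/bus/model/core_matrix.py | gen_subshape_coords
-- ===== SOURCE A (Python) =====
-- import math
--
-- def gen_subshape_coords(xc, yc):
--     """
--     Retourne les coords d'une sous matrice 5*5 centrée en xc, yc, tronquée
--     symétriquement à 17 cases
--     """
--     adim = 2
--     maxrange = range(xc - adim, xc + adim + 1)
--     y0 = yc - adim
--     for j in range(0, 5):
--         delta = int(math.fabs(j - adim))
--         if delta == 2:
--             xrange = range(maxrange.start, maxrange.stop, 2)
--         elif delta == 1:
--             xrange = range(maxrange.start + 1, maxrange.stop - 1)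
--         else:
--             xrange = maxrange
--         for i in xrange:
--             yield (i, y0 + j)
-- ===== SOURCE B (Python) =====
-- def gen_subshape_coords(xc, yc):
--     maxrange = range(xc - 2, xc + 3)
--     for j in range(5):
--         y = yc - 2 + j
--         for i in maxrange:
--             if abs(i - xc) * abs(j - 2) != 2:
--                 yield (i, y)
-- ===== Notes on version B (the rewrite author's own statement) =====
-- stated objective: simpler
-- what changed: Replaces A's per-row branch constructing three distinct column ranges (step-2, narrowed, full) by one uniform scan of the same 5x5 box filtered by the single predicate |i-xc|*|j-2| != 2.
import Mathlib
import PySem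

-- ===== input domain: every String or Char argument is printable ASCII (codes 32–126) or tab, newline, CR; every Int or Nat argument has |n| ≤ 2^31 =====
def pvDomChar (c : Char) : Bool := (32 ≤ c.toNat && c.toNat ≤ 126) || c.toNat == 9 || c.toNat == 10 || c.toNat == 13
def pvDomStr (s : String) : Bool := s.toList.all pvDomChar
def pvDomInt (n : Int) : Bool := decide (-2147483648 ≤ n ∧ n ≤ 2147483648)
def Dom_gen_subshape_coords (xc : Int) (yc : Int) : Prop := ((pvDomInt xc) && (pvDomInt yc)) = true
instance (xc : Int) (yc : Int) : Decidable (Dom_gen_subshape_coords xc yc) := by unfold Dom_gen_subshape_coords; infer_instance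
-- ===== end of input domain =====

-- B replaces A's per-row choice among three distinct column ranges by one uniform 5x5 scan
-- filtered by the single predicate |i-xc|*|j-2| ≠ 2 (objective: simpler; same cost).

-- ===== PORT A =====
-- literal port of A: per-row branch picks one of three column ranges, rows concatenated in order
def gen_subshape_coords (xc : Int) (yc : Int) : List (Int × Int) :=
  let adim : Int := 2
  let mrStart : Int := xc - adim
  let mrStop : Int := xc + adim + 1
  let y0 : Int := yc - adim
  (PySem.List.pyRange 0 5 1).foldl (fun acc j =>
    let delta : Int := ((j : Int) - adim).natAbs   -- int(math.fabs(j - adim)), exact on ints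
    let xr : List Int :=
      if delta = 2 then PySem.List.pyRange mrStart mrStop 2
      else if delta = 1 then PySem.List.pyRange (mrStart + 1) (mrStop - 1) 1
      else PySem.List.pyRange mrStart mrStop 1
    acc ++ xr.map (fun i => (i, y0 + j))) []

-- ===== PORT B =====
-- literal port of B: uniform scan of range(xc-2, xc+3) per row, filtered by one predicate
def gen_subshape_coords_alt (xc : Int) (yc : Int) : List (Int × Int) :=
  (PySem.List.pyRange 0 5 1).foldl (fun acc j =>
    let y : Int := yc - 2 + j
    acc ++ ((PySem.List.pyRange (xc - 2) (xc + 3) 1).filter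
        (fun i => (i - xc).natAbs * (j - 2).natAbs ≠ 2)).map (fun i => (i, y))) []

-- ===== PRECONDITION & SPEC =====
def Spec_gen_subshape_coords (xc : Int) (yc : Int) (out : List (Int × Int)) : Prop := out = gen_subshape_coords_alt xc yc
instance (xc : Int) (yc : Int) (out : List (Int × Int)) : Decidable (Spec_gen_subshape_coords xc yc out) := by unfold Spec_gen_subshape_coords; infer_instance

-- ===== CLAIM (what is proved, stated in full; the proofs are below) =====
def Claim_equal_gen_subshape_coords : Prop := ∀ (xc : Int) (yc : Int), Dom_gen_subshape_coords xc yc → Spec_gen_subshape_coords xc yc (gen_subshape_coords xc yc)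

-- ===== LEMMAS AND PROOFS =====

theorem pv_e1 (xc : Int) : PySem.List.pyRange (xc-2) (xc+2+1) 1 = [xc-2, xc-1, xc, xc+1, xc+2] := by
  rw [PySem.List.pyRange_one]
  have h : (xc+2+1-(xc-2)).toNat = 5 := by omega
  rw [h]
  simp [List.range_succ]
  omega

theorem pv_e1' (xc : Int) : PySem.List.pyRange (xc-2) (xc+3) 1 = [xc-2, xc-1, xc, xc+1, xc+2] := by
  rw [show xc + 3 = xc + 2 + 1 by ring]; exact pv_e1 xc

theorem pv_e2 (xc : Int) : PySem.List.pyRange (xc-2) (xc+2+1) 2 = [xc-2, xc, xc+2] := by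
  rw [PySem.List.pyRange_of_pos _ _ (by norm_num)]
  have hlt : xc-2 < xc+2+1 := by omega
  have h : ((xc+2+1-(xc-2)+2-1)/2).toNat = 3 := by omega
  rw [if_pos hlt, h]
  simp [List.range_succ]
  omega

theorem pv_e3 (xc : Int) : PySem.List.pyRange (xc-2+1) (xc+2+1-1) 1 = [xc-1, xc, xc+1] := by
  rw [PySem.List.pyRange_one]
  have h : (xc+2+1-1-(xc-2+1)).toNat = 3 := by omega
  rw [h]
  simp [List.range_succ]
  omega

-- ===== VERDICT (by name: the statement is the Claim_ definition above) =====
theorem gen_subshape_coords_spec : Claim_equal_gen_subshape_coords := by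
  intro xc yc _
  unfold Spec_gen_subshape_coords gen_subshape_coords gen_subshape_coords_alt
  have hr5 : PySem.List.pyRange 0 5 1 = [0, 1, 2, 3, 4] := by decide
  rw [hr5]
  simp only [List.foldl, pv_e1 xc, pv_e1' xc, pv_e2 xc, pv_e3 xc, List.filter,
    List.nil_append]
  norm_num [show xc - 2 - xc = (-2 : Int) by ring, show xc - 1 - xc = (-1 : Int) by ring,
    show xc + 1 - xc = (1 : Int) by ring, show xc + 2 - xc = (2 : Int) by ring]
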